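-- pv_equiv track=rewrite | github.com/BigTou1888/YZOI_practice | python_solution/basic_algorithm/recursion/1520.py | divisor_2
-- ===== SOURCE A (Python) =====
-- def divisor_2(m):
--     div=2
--     pow=0
--     result=''
--     first = 1
--     while m!=0:
--         if ((m%div)!=0):
--             pow_str=''
--             if pow==0:
--                 pow_str='2(0)'
--             elif pow==1:
--                 pow_str='2'
--             elif pow == 2:
--                 pow_str = '2(2)'
--             else:
--                 pow_str = '2('+divisor_2(pow)+')'
--
--             m -= (m%div)
--             if first:
--                 result = pow_str
--                 first=0
--             else:
--                 result = pow_str +'+'+ result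
--         pow+=1
--         div *=2
--     return result
-- ===== SOURCE B (Python) =====
-- def divisor_2(m):
--     parts = []
--     while m != 0:
--         e = 0
--         p = 1
--         while p * 2 <= m:
--             p *= 2
--             e += 1
--         parts.append(_term(e))
--         m -= p
--     return '+'.join(parts)
--
--
-- def _term(e):
--     if e == 0:
--         return '2(0)'
--     if e == 1:
--         return '2'
--     return '2(' + divisor_2(e) + ')'
-- ===== Notes on version B (the rewrite author's own statement) =====
-- stated objective: alternative
-- what changed: A scans bits low-to-high with a doubling divisor and modulo-subtraction, prepending each term to the result string under a first-flag; B is a greedy decomposition: it repeatedly searches for the largest power of 2 not exceeding the remainder, appends that term (formatted by a small helper), subtracts the power, and finally '+'.joins the terms, emitting high-to-low directly with no prepend/flag logic.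
import Mathlib
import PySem

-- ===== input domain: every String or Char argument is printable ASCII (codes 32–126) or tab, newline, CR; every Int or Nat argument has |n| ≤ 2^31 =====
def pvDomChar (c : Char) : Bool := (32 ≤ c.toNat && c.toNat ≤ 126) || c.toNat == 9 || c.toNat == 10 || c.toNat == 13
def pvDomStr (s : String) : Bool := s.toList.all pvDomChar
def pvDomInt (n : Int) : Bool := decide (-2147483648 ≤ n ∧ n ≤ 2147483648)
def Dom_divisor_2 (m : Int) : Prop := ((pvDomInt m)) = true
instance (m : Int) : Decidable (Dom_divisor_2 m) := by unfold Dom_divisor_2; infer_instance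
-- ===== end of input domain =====

-- B replaces A's low-to-high bit scan (doubling divisor, modulo-subtraction, prepend under a
-- first-flag) by a greedy decomposition: repeatedly extract the largest power of 2 ≤ the
-- remainder, append its formatted term, and '+'.join; equivalence of RETURN values on m ≥ 0.

-- ===== PORT A =====
-- A's while-loop (state m, div, pow, first, result) with nested recursive calls, as one
-- fueled recursion; the fuel is a totality guard only (proved sufficient for all m ≥ 0).
def pvA_loop : Nat → Int → Int → Int → Int → String → String
  | 0, _, _, _, _, result => result
  | f + 1, m, dv, pow, first, result =>
    if m ≠ 0 then
      if PySem.Int.mod m dv ≠ 0 then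
        let pow_str : String :=
          if pow = 0 then "2(0)"
          else if pow = 1 then "2"
          else if pow = 2 then "2(2)"
          else "2(" ++ pvA_loop f pow 2 0 1 "" ++ ")"
        let m' := m - PySem.Int.mod m dv
        if first ≠ 0 then
          pvA_loop f m' (dv * 2) (pow + 1) 0 pow_str
        else
          pvA_loop f m' (dv * 2) (pow + 1) first (pow_str ++ "+" ++ result)
      else
        pvA_loop f m (dv * 2) (pow + 1) first result
    else result

def divisor_2 (m : Int) : String := pvA_loop (m.toNat + 2) m 2 0 1 ""

-- ===== PORT B =====
-- B's inner while-loop: search for the largest power of 2 not exceeding m (state e, p).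
def pvB_top : Nat → Int → Int → Int → Int × Int
  | 0, _, e, p => (e, p)
  | f + 1, m, e, p => if p * 2 ≤ m then pvB_top f m (e + 1) (p * 2) else (e, p)

-- B's outer while-loop (state m, parts) with _term inlined (mutual via the shared fuel,
-- a totality guard only), then '+'.join(parts).
def pvB_main : Nat → Int → List String → String
  | 0, _, parts => PySem.Str.join "+" parts
  | f + 1, m, parts =>
    if m ≠ 0 then
      let ep := pvB_top (f + 1) m 0 1
      let t : String :=
        if ep.1 = 0 then "2(0)"
        else if ep.1 = 1 then "2"
        else "2(" ++ pvB_main f ep.1 [] ++ ")"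
      pvB_main f (m - ep.2) (parts ++ [t])
    else PySem.Str.join "+" parts

def divisor_2_alt (m : Int) : String := pvB_main (m.toNat + 2) m []

-- ===== PRECONDITION & SPEC =====
-- Pre_ excludes negative m, on which A's while loop never terminates (A returns no value there).
def Pre_divisor_2 (m : Int) : Prop := 0 ≤ m
instance (m : Int) : Decidable (Pre_divisor_2 m) := by unfold Pre_divisor_2; infer_instance
def pvWitness_divisor_2 : Int := (137)

def Spec_divisor_2 (m : Int) (out : String) : Prop := out = divisor_2_alt m
instance (m : Int) (out : String) : Decidable (Spec_divisor_2 m out) := by unfold Spec_divisor_2; infer_instance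

-- ===== CLAIM (what is proved, stated in full; the proofs are below) =====
def Claim_equal_divisor_2 : Prop := ∀ (m : Int), Dom_divisor_2 m → Pre_divisor_2 m → Spec_divisor_2 m (divisor_2 m)

-- ===== LEMMAS AND PROOFS =====

-- exponents of the set bits of n, offset by e, low to high (proof-side reference)
def pvBits (n : Nat) (e : Int) : List Int :=
  if h : n = 0 then []
  else (if n % 2 = 1 then [e] else []) ++ pvBits (n / 2) (e + 1)
decreasing_by exact Nat.div_lt_self (Nat.pos_of_ne_zero h) one_lt_two

def pvFmt (e : Int) : String :=
  if e = 0 then "2(0)" else if e = 1 then "2" else "2(" ++ divisor_2_alt e ++ ")"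

def pvCanonAt (n p : Nat) : String :=
  PySem.Str.join "+" ((pvBits n (p : Int)).reverse.map pvFmt)

theorem pvBits_ne_nil : ∀ (n : Nat) (e : Int), n ≠ 0 → pvBits n e ≠ [] := by
  intro n
  induction n using Nat.strong_induction_on with
  | _ n IH =>
    intro e h
    rw [pvBits]
    by_cases h2 : n % 2 = 1
    · simp [h, h2]
    · simp [h, h2]
      exact IH (n / 2) (Nat.div_lt_self (Nat.pos_of_ne_zero h) one_lt_two) _ (by omega)

theorem pv_join_snoc : ∀ (l : List String) (x : String),
    PySem.Str.join "+" (l ++ [x]) = if l = [] then x else PySem.Str.join "+" l ++ "+" ++ x := by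
  intro l
  induction l with
  | nil => intro x; simp [PySem.Str.join, PySem.Chars.join_singleton]
  | cons y ys IH =>
    intro x
    cases ys with
    | nil =>
      simp only [List.nil_append, List.cons_append, if_neg (by simp : ¬([y] = []))]
      rw [← String.toList_inj]
      simp [PySem.Str.join, PySem.Chars.join_cons_cons, PySem.Chars.join_singleton]
    | cons z zs =>
      have IH2 := IH x
      rw [if_neg (by simp)] at IH2
      rw [if_neg (by simp)]
      simp only [List.cons_append]
      rw [← String.toList_inj] at IH2 ⊢
      have hpl : "+".toList = ['+'] := rfl
      simp only [PySem.Str.join, String.toList_ofList, List.map_cons, List.map_append,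
        List.map_nil, String.toList_append, hpl] at IH2 ⊢
      rw [PySem.Chars.join_cons_cons, PySem.Chars.join_cons_cons]
      simp only [List.cons_append] at IH2 ⊢
      rw [IH2]
      simp [List.append_assoc]

-- 2^k ≤ n < 2^(k+1) pins k = Nat.log2 n
theorem pv_log2_unique (n k : Nat) (hn : n ≠ 0) (h1 : 2 ^ k ≤ n) (h2 : n < 2 ^ (k + 1)) :
    Nat.log2 n = k := by
  have ha : 2 ^ Nat.log2 n ≤ n := Nat.log2_self_le hn
  have hb : n < 2 ^ (Nat.log2 n + 1) := Nat.lt_log2_self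
  by_contra hne
  rcases Nat.lt_or_ge k (Nat.log2 n) with hlt | hge
  · have : 2 ^ (k + 1) ≤ 2 ^ Nat.log2 n := Nat.pow_le_pow_right (by norm_num) (by omega)
    omega
  · have : 2 ^ (Nat.log2 n + 1) ≤ 2 ^ k := Nat.pow_le_pow_right (by norm_num) (by omega)
    omega

-- the greedy step: removing the top set bit splits off the LAST element of pvBits
theorem pvBits_split : ∀ (n : Nat), ∀ (p : Nat), n ≠ 0 →
    pvBits n (p : Int) =
      pvBits (n - 2 ^ Nat.log2 n) (p : Int) ++ [((p + Nat.log2 n : Nat) : Int)] := by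
  intro n
  induction n using Nat.strong_induction_on with
  | _ n IH =>
    intro p hn
    by_cases h2 : 2 ≤ n
    · have hd0 : n / 2 ≠ 0 := by omega
      have hle : 2 ^ Nat.log2 (n / 2) ≤ n / 2 := Nat.log2_self_le hd0
      have hlt : n / 2 < 2 ^ (Nat.log2 (n / 2) + 1) := Nat.lt_log2_self
      have hepos : 2 ^ (Nat.log2 (n / 2) + 1) = 2 * 2 ^ Nat.log2 (n / 2) := by ring
      have hepos2 : 2 ^ (Nat.log2 (n / 2) + 1 + 1) = 2 * 2 ^ (Nat.log2 (n / 2) + 1) := by ring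
      have he : Nat.log2 n = Nat.log2 (n / 2) + 1 :=
        pv_log2_unique n _ hn (by omega) (by omega)
      have hlen : 2 ^ Nat.log2 n ≤ n := Nat.log2_self_le hn
      have hmod : (n - 2 ^ Nat.log2 n) % 2 = n % 2 := by
        rw [he, hepos] at hlen ⊢; omega
      have hdiv : (n - 2 ^ Nat.log2 n) / 2 = n / 2 - 2 ^ Nat.log2 (n / 2) := by
        rw [he, hepos] at hlen ⊢; omega
      have IH2 := IH (n / 2) (Nat.div_lt_self (by omega) one_lt_two) (p + 1) hd0
      have hcast : ((p : Int) + 1) = ((p + 1 : Nat) : Int) := by push_cast; ring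
      have hcast2 : ((p + 1 + Nat.log2 (n / 2) : Nat) : Int) = ((p + Nat.log2 n : Nat) : Int) := by
        rw [he]; push_cast; ring
      conv_lhs => rw [pvBits]
      rw [dif_neg hn, hcast, IH2, hcast2]
      by_cases hm : n - 2 ^ Nat.log2 n = 0
      · -- n = 2^(log2 n) with log2 n ≥ 1, so the low bit is 0 and both sides are [p + log2 n]
        have hnodd : ¬ n % 2 = 1 := by rw [he, hepos] at hlen; omega
        have hmd : n / 2 - 2 ^ Nat.log2 (n / 2) = 0 := by rw [← hdiv, hm]
        rw [hmd, hm]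
        simp [hnodd, pvBits]
      · conv_rhs => rw [pvBits]
        rw [dif_neg hm, hmod, hdiv, hcast]
        simp [List.append_assoc]
    · have h1 : n = 1 := by omega
      subst h1
      have hl : Nat.log2 1 = 0 := by decide
      rw [hl]
      simp [pvBits]

theorem pv_log2_lt (n : Nat) (hn : n ≠ 0) : Nat.log2 n < n := by
  have h1 : 2 ^ Nat.log2 n ≤ n := Nat.log2_self_le hn
  have h2 : Nat.log2 n < 2 ^ Nat.log2 n := Nat.lt_two_pow_self
  omega

theorem pvB_top_eq : ∀ (f : Nat), ∀ (k : Nat) (n : Nat), 2 ^ k ≤ n → n < 2 ^ (k + f) →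
    pvB_top f (n : Int) (k : Int) ((2 ^ k : Nat) : Int) =
      ((Nat.log2 n : Int), ((2 ^ Nat.log2 n : Nat) : Int)) := by
  intro f
  induction f with
  | zero =>
    intro k n h1 h2
    rw [Nat.add_zero] at h2; omega
  | succ g IH =>
    intro k n h1 h2
    have hn : n ≠ 0 := by have := Nat.one_le_two_pow (n := k); omega
    have key : ((2 ^ k : Nat) : Int) * 2 = ((2 ^ (k + 1) : Nat) : Int) := by
      push_cast [pow_succ]; ring
    rw [pvB_top, key]
    by_cases hc : 2 ^ (k + 1) ≤ n
    · rw [if_pos (by exact_mod_cast hc)]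
      have e1 : (k : Int) + 1 = ((k + 1 : Nat) : Int) := by push_cast; ring
      rw [e1]
      have e2 : k + (g + 1) = k + 1 + g := by omega
      exact IH (k + 1) n hc (e2 ▸ h2)
    · rw [if_neg (by exact_mod_cast hc)]
      rw [pv_log2_unique n k hn h1 (by omega)]

theorem pvB_main_eq : ∀ (f : Nat), ∀ (n : Nat) (parts : List String), n + 2 ≤ f →
    pvB_main f (n : Int) parts =
      PySem.Str.join "+" (parts ++ (pvBits n ((0 : Nat) : Int)).reverse.map pvFmt) := by
  intro f
  induction f using Nat.strong_induction_on with
  | _ f IH =>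
    intro n parts hf
    obtain ⟨g, rfl⟩ : ∃ g, f = g + 1 := ⟨f - 1, by omega⟩
    rw [pvB_main]
    by_cases hn : n = 0
    · subst hn; simp [pvBits]
    · have hnI : (n : Int) ≠ 0 := by exact_mod_cast hn
      rw [if_pos hnI]
      have htop : pvB_top (g + 1) (n : Int) ((0 : Nat) : Int) ((2 ^ 0 : Nat) : Int) =
          ((Nat.log2 n : Int), ((2 ^ Nat.log2 n : Nat) : Int)) := by
        apply pvB_top_eq (g + 1) 0 n (by simpa using Nat.one_le_iff_ne_zero.mpr hn)
        have h1 : n < 2 ^ n := Nat.lt_two_pow_self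
        have h2 : 2 ^ n ≤ 2 ^ (0 + (g + 1)) := Nat.pow_le_pow_right (by norm_num) (by omega)
        omega
      have htop' : pvB_top (g + 1) (n : Int) 0 1 =
          ((Nat.log2 n : Int), ((2 ^ Nat.log2 n : Nat) : Int)) := by
        have : ((0 : Nat) : Int) = 0 := by norm_num
        have h1 : ((2 ^ 0 : Nat) : Int) = 1 := by norm_num
        rw [← this, ← h1]; exact htop
      rw [htop']
      show pvB_main g ((n : Int) - ((2 ^ Nat.log2 n : Nat) : Int))
          (parts ++ [if ((Nat.log2 n : Int)) = 0 then "2(0)"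
            else if ((Nat.log2 n : Int)) = 1 then "2"
            else "2(" ++ pvB_main g ((Nat.log2 n : Int)) [] ++ ")"]) =
        PySem.Str.join "+" (parts ++ (pvBits n ((0 : Nat) : Int)).reverse.map pvFmt)
      have hle : 2 ^ Nat.log2 n ≤ n := Nat.log2_self_le hn
      have hlog := pv_log2_lt n hn
      -- the formatted term equals pvFmt (log2 n)
      have ht : (if ((Nat.log2 n : Int)) = 0 then "2(0)"
          else if ((Nat.log2 n : Int)) = 1 then "2"
          else "2(" ++ pvB_main g ((Nat.log2 n : Int)) [] ++ ")") = pvFmt ((Nat.log2 n : Int)) := by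
        unfold pvFmt
        by_cases h0 : Nat.log2 n = 0
        · simp [h0]
        · by_cases h1 : Nat.log2 n = 1
          · simp [h1]
          · have c0 : ((Nat.log2 n : Int)) ≠ 0 := by exact_mod_cast h0
            have c1 : ((Nat.log2 n : Int)) ≠ 1 := by exact_mod_cast h1
            rw [if_neg c0, if_neg c1, if_neg c0, if_neg c1]
            have e1 : pvB_main g ((Nat.log2 n : Int)) [] =
                PySem.Str.join "+" ([] ++ (pvBits (Nat.log2 n) ((0 : Nat) : Int)).reverse.map pvFmt) :=
              IH g (by omega) (Nat.log2 n) [] (by omega)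
            have e2 : divisor_2_alt ((Nat.log2 n : Int)) =
                PySem.Str.join "+" ([] ++ (pvBits (Nat.log2 n) ((0 : Nat) : Int)).reverse.map pvFmt) := by
              unfold divisor_2_alt
              rw [Int.toNat_natCast]
              exact IH (Nat.log2 n + 2) (by omega) (Nat.log2 n) [] (le_refl _)
            rw [e1, e2]
      rw [ht]
      have hsub : (n : Int) - ((2 ^ Nat.log2 n : Nat) : Int) = ((n - 2 ^ Nat.log2 n : Nat) : Int) := by
        omega
      rw [hsub]
      have h1le : 1 ≤ 2 ^ Nat.log2 n := Nat.one_le_two_pow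
      have hfuel2 : n - 2 ^ Nat.log2 n + 2 ≤ g := by omega
      rw [IH g (by omega) (n - 2 ^ Nat.log2 n) _ hfuel2]
      congr 1
      rw [pvBits_split n 0 hn]
      have : ((0 + Nat.log2 n : Nat) : Int) = ((Nat.log2 n : Int)) := by push_cast; ring
      rw [this]
      simp [List.append_assoc]

theorem pv_alt_eq_canon (n : Nat) : divisor_2_alt (n : Int) = pvCanonAt n 0 := by
  unfold divisor_2_alt pvCanonAt
  rw [Int.toNat_natCast, pvB_main_eq (n + 2) n [] (le_refl _)]
  simp

theorem pv_two_pow (p : Nat) (h : 3 ≤ p) : 2 * p + 1 ≤ 2 ^ p := by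
  induction p with
  | zero => omega
  | succ q IH =>
    by_cases hq : 3 ≤ q
    · have := IH hq; rw [pow_succ]; omega
    · interval_cases q <;> simp_all

theorem pv_canon_odd (n p : Nat) (hn : n ≠ 0) (hodd : n % 2 = 1) :
    pvCanonAt n p = if n / 2 = 0 then pvFmt (p : Int)
      else pvCanonAt (n / 2) (p + 1) ++ "+" ++ pvFmt (p : Int) := by
  unfold pvCanonAt
  conv_lhs => rw [pvBits]
  simp only [hn, hodd, dite_false, if_true, List.singleton_append, List.reverse_cons,
    List.map_append, List.map_cons, List.map_nil]
  have hcast : ((p : Int) + 1) = ((p + 1 : Nat) : Int) := by push_cast; ring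
  rw [hcast, pv_join_snoc]
  by_cases h0 : n / 2 = 0
  · rw [if_pos (by rw [h0, pvBits]; simp), if_pos h0]
  · rw [if_neg (by simp [pvBits_ne_nil _ _ h0]), if_neg h0]

theorem pv_canon_even (n p : Nat) (hn : n ≠ 0) (heven : n % 2 = 0) :
    pvCanonAt n p = pvCanonAt (n / 2) (p + 1) := by
  unfold pvCanonAt
  conv_lhs => rw [pvBits]
  have hcast : ((p : Int) + 1) = ((p + 1 : Nat) : Int) := by push_cast; ring
  rw [dif_neg hn, if_neg (by omega : ¬ n % 2 = 1), List.nil_append, hcast]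

theorem pvA_loop_eq : ∀ (f : Nat) (n p : Nat) (first : Int) (result : String),
    n * 2 ^ p + 2 ≤ f + p →
    pvA_loop f ((n : Int) * 2 ^ p) (2 ^ (p + 1)) (p : Int) first result =
      if n = 0 then result
      else if first ≠ 0 then pvCanonAt n p else pvCanonAt n p ++ "+" ++ result := by
  intro f
  induction f with
  | zero =>
    intro n p first result hfuel
    by_cases hn : n = 0
    · simp [pvA_loop, hn]
    · exfalso
      have h1 : p < 2 ^ p := Nat.lt_two_pow_self
      have h2 : 2 ^ p ≤ n * 2 ^ p := Nat.le_mul_of_pos_left _ (Nat.pos_of_ne_zero hn)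
      omega
  | succ g IH =>
    intro n p first result hfuel
    by_cases hn : n = 0
    · simp [pvA_loop, hn]
    · have hppos : (0 : Int) < 2 ^ p := by positivity
      have hm0 : ((n : Int) * 2 ^ p) ≠ 0 := by
        have hnn : (0 : Int) < (n : Int) := by exact_mod_cast Nat.pos_of_ne_zero hn
        nlinarith
      rw [pvA_loop]
      rw [if_pos hm0]
      have hn2 : (n : Int) = 2 * ((n / 2 : Nat) : Int) + ((n % 2 : Nat) : Int) := by omega
      have hm : ((n : Int) * 2 ^ p) = ((n / 2 : Nat) : Int) * 2 ^ (p + 1) + ((n % 2 : Nat) : Int) * 2 ^ p := by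
        rw [hn2, pow_succ]; ring
      have hmod : PySem.Int.mod ((n : Int) * 2 ^ p) (2 ^ (p + 1)) = ((n % 2 : Nat) : Int) * 2 ^ p := by
        rw [PySem.Int.mod_eq_emod_of_pos (by positivity), hm, add_comm, mul_comm ((n / 2 : Nat) : Int)]
        rw [Int.add_mul_emod_self_left]
        apply Int.emod_eq_of_lt
        · positivity
        · rw [pow_succ]
          have hle1 : ((n % 2 : Nat) : Int) ≤ 1 := by omega
          nlinarith
      have hsub : ((n : Int) * 2 ^ p) - ((n % 2 : Nat) : Int) * 2 ^ p = ((n / 2 : Nat) : Int) * 2 ^ (p + 1) := by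
        rw [hm]; ring
      have hdv2 : ((2 : Int) ^ (p + 1)) * 2 = 2 ^ (p + 1 + 1) := by ring
      have hp1 : ((p : Int) + 1) = ((p + 1 : Nat) : Int) := by push_cast; ring
      rw [hmod]
      by_cases hpar : n % 2 = 1
      · have hone : (((n % 2 : Nat) : Int)) = 1 := by rw [hpar]; norm_num
        have hmodne : (((n % 2 : Nat) : Int)) * 2 ^ p ≠ 0 := by
          rw [hone, one_mul]; exact ne_of_gt hppos
        rw [if_pos hmodne]
        simp only [hsub, hdv2, hp1]
        -- the formatted string for exponent p equals pvFmt p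
        have hfmt : (if (p : Int) = 0 then "2(0)"
            else if (p : Int) = 1 then "2"
            else if (p : Int) = 2 then "2(2)"
            else "2(" ++ pvA_loop g (p : Int) 2 0 1 "" ++ ")") = pvFmt (p : Int) := by
          by_cases hp0 : p = 0
          · subst hp0; norm_num [pvFmt]
          by_cases hp1' : p = 1
          · subst hp1'; norm_num [pvFmt]
          by_cases hp2 : p = 2
          · subst hp2; norm_num [pvFmt]; decide
          · have c0 : ((p : Int)) ≠ 0 := by exact_mod_cast hp0
            have c1 : ((p : Int)) ≠ 1 := by exact_mod_cast hp1'
            have c2 : ((p : Int)) ≠ 2 := by exact_mod_cast hp2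
            rw [if_neg c0, if_neg c1, if_neg c2]
            unfold pvFmt
            rw [if_neg c0, if_neg c1]
            have hp3 : 3 ≤ p := by omega
            have h2p := pv_two_pow p hp3
            have h2le : 2 ^ p ≤ n * 2 ^ p := Nat.le_mul_of_pos_left _ (Nat.pos_of_ne_zero hn)
            have hnest := IH p 0 1 "" (by simpa using by omega)
            simp only [pow_zero, mul_one, zero_add, pow_one, Nat.cast_zero] at hnest
            rw [if_neg hp0, if_pos (by norm_num : (1 : Int) ≠ 0)] at hnest
            rw [hnest, pv_alt_eq_canon p]
        rw [hfmt]
        have e1 : n / 2 * 2 ^ (p + 1) = (n - 1) * 2 ^ p := by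
          rw [pow_succ]
          have h2 : n / 2 * 2 = n - 1 := by omega
          calc n / 2 * (2 ^ p * 2) = n / 2 * 2 * 2 ^ p := by ring
            _ = (n - 1) * 2 ^ p := by rw [h2]
        have h1le : 1 ≤ 2 ^ p := Nat.one_le_two_pow
        have e2 : n * 2 ^ p = (n - 1) * 2 ^ p + 2 ^ p := by
          have hn1 : n - 1 + 1 = n := by omega
          calc n * 2 ^ p = (n - 1 + 1) * 2 ^ p := by rw [hn1]
            _ = (n - 1) * 2 ^ p + 2 ^ p := by ring
        have hcanon := pv_canon_odd n p hn hpar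
        rw [if_neg hn]
        by_cases hf : first ≠ 0
        · rw [if_pos hf, if_pos hf]
          rw [IH (n / 2) (p + 1) 0 (pvFmt (p : Int)) (by omega)]
          rw [if_neg (by norm_num : ¬ ((0 : Int) ≠ 0))]
          by_cases h0 : n / 2 = 0
          · rw [if_pos h0, hcanon, if_pos h0]
          · rw [if_neg h0, hcanon, if_neg h0]
        · rw [if_neg hf, if_neg hf]
          rw [IH (n / 2) (p + 1) first (pvFmt (p : Int) ++ "+" ++ result) (by omega)]
          rw [if_neg hf]
          by_cases h0 : n / 2 = 0
          · rw [if_pos h0, hcanon, if_pos h0]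
          · rw [if_neg h0, hcanon, if_neg h0]; simp [String.append_assoc]
      · -- even bit: branch not taken
        have heven : n % 2 = 0 := by omega
        have hz : (((n % 2 : Nat) : Int) * 2 ^ p) = 0 := by rw [heven]; simp
        rw [if_neg (show ¬(((n % 2 : Nat) : Int) * 2 ^ p ≠ 0) from fun hc => hc hz)]
        have hmeq : ((n : Int) * 2 ^ p) = ((n / 2 : Nat) : Int) * 2 ^ (p + 1) := by
          rw [hm, hz, add_zero]
        rw [hmeq, hdv2, hp1]
        have e1 : n / 2 * 2 ^ (p + 1) = n * 2 ^ p := by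
          rw [pow_succ]
          have h2 : n / 2 * 2 = n := by omega
          calc n / 2 * (2 ^ p * 2) = n / 2 * 2 * 2 ^ p := by ring
            _ = n * 2 ^ p := by rw [h2]
        rw [IH (n / 2) (p + 1) first result (by omega)]
        have hd0 : n / 2 ≠ 0 := by omega
        rw [if_neg hd0, if_neg hn, pv_canon_even n p hn heven]
-- ===== VERDICT (by name: the statement is the Claim_ definition above) =====
theorem divisor_2_spec : Claim_equal_divisor_2 := by
  unfold Claim_equal_divisor_2
  intro m _ hpre
  unfold Spec_divisor_2
  unfold Pre_divisor_2 at hpre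
  obtain ⟨n, rfl⟩ : ∃ n : Nat, m = (n : Int) := ⟨m.toNat, (Int.toNat_of_nonneg hpre).symm⟩
  unfold divisor_2
  rw [Int.toNat_natCast]
  have h := pvA_loop_eq (n + 2) n 0 1 "" (by simp)
  simp only [pow_zero, mul_one, zero_add, pow_one, Nat.cast_zero] at h
  rw [h]
  by_cases hn : n = 0
  · subst hn; rw [if_pos rfl]; decide
  · rw [if_neg hn, if_pos (by norm_num : (1 : Int) ≠ 0), pv_alt_eq_canon n]
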